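-- pv_equiv track=rewrite | github.com/pypi-data/pypi-mirror-396 | packages/serger/serger-0.2.0.tar.gz/serger-0.2.0/src/serger/module_actions.py | get_deleted_modules_from_actions
-- ===== SOURCE A (Python) =====
-- def get_deleted_modules_from_actions(
--     actions: list["ModuleActionFull"],
--     initial_modules: list[str],
--     detected_packages: set[str],  # noqa: ARG001
-- ) -> set[str]:
--     """Get set of modules that are deleted by actions.
--
--     Applies delete actions to determine which modules are removed.
--
--     Args:
--         actions: List of actions to apply
--         initial_modules: Initial list of module names
--         detected_packages: Set of detected package names (for context)
--
--     Returns: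
--         Set of module names that are deleted
--     """
--     # Start with all initial modules
--     current_modules = set(initial_modules)
--
--     # Apply delete actions to track what gets deleted
--     for action in actions:
--         action_type = action.get("action", "move")
--         if action_type == "delete":
--             source = action["source"]  # pyright: ignore[reportTypedDictNotRequiredAccess]
--             # Remove source and all submodules
--             to_remove: set[str] = set()
--             for mod in current_modules:
--                 if mod == source or mod.startswith(f"{source}."):
--                     to_remove.add(mod)
--             current_modules -= to_remove
--
--     # Return the difference (what was deleted)
--     initial_set = set(initial_modules)
--     return initial_set - current_modules
-- ===== SOURCE B (Python) =====
-- def get_deleted_modules_from_actions(actions, initial_modules, detected_packages):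
--     """Deleted modules = initial modules having some dotted-prefix ancestor among delete sources."""
--     sources = {a["source"] for a in actions if a.get("action", "move") == "delete"}
--     deleted = set()
--     for mod in initial_modules:
--         if any(anc in sources for anc in _ancestors(mod)):
--             deleted.add(mod)
--     return deleted
--
--
-- def _ancestors(mod):
--     # mod itself, and every prefix of mod that ends just before a '.'
--     return [mod] + [mod[:i] for i, ch in enumerate(mod) if ch == "."]
-- ===== Notes on version B (the rewrite author's own statement) =====
-- stated objective: alternative
-- what changed: Instead of re-scanning the whole current module set for every delete action, B collects all delete sources into one set and decides each module once by testing its dotted-prefix ancestors for membership (not measurably faster on the generated inputs).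
import Mathlib
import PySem

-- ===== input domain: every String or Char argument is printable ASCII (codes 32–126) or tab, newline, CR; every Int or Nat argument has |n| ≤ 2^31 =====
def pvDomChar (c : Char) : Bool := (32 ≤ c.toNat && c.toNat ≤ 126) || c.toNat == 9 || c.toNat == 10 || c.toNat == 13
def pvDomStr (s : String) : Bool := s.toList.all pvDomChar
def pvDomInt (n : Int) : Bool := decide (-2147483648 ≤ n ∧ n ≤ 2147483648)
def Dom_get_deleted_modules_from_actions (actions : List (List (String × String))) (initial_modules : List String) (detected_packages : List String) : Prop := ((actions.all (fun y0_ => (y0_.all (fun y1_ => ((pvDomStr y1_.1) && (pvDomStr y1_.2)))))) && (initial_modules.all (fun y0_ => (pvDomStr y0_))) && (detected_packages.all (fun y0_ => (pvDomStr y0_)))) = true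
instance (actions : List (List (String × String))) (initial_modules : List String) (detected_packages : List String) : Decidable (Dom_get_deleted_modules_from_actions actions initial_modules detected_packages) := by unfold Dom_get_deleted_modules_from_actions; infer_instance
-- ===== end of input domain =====

-- B replaces A's per-delete-action rescan of the whole current module set by one set of delete
-- sources and a single pass over the modules testing their dotted-prefix ancestors (objective: alternative).

-- ===== PORT A =====
-- mod == source or mod.startswith(source + ".")
def pvMatch (source mod : String) : Bool :=
  mod == source || PySem.Str.startswith mod (source ++ ".")

def get_deleted_modules_from_actions (actions : List (List (String × String))) (initial_modules : List String) (detected_packages : List String) : List String :=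
  let current : PySem.Set String := actions.foldl (fun cur action =>
    if PySem.Dict.getD (PySem.Dict.mk action) "action" "move" == "delete" then
      match PySem.Dict.get? (PySem.Dict.mk action) "source" with
      | some source =>
        -- to_remove = {mod ∈ current | mod == source or mod.startswith(source + ".")}
        let to_remove : PySem.Set String :=
          cur.foldl (fun t m => if pvMatch source m then PySem.Set.add t m else t) PySem.Set.empty
        PySem.Set.diff cur to_remove
      | none => cur   -- Python raises KeyError here; excluded by Pre_
    else cur) (PySem.Set.ofList initial_modules)
  PySem.Set.diff (PySem.Set.ofList initial_modules) current

-- ===== PORT B =====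
-- _ancestors(mod): mod itself and every mod[:i] with mod[i] == '.'
-- (mod[:i] with 0 ≤ i < len(mod) is exactly List.take i on the characters — exact here)
def pvAncestors (mod : String) : List String :=
  mod :: (PySem.List.enumerate mod.toList 0).filterMap
    (fun p => if p.2 = '.' then some (String.ofList (mod.toList.take p.1.toNat)) else none)

def get_deleted_modules_from_actions_alt (actions : List (List (String × String))) (initial_modules : List String) (detected_packages : List String) : List String :=
  let sources : PySem.Set String := actions.foldl (fun s action =>
    if PySem.Dict.getD (PySem.Dict.mk action) "action" "move" == "delete" then
      match PySem.Dict.get? (PySem.Dict.mk action) "source" with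
      | some src => PySem.Set.add s src
      | none => s   -- Python raises KeyError here; excluded by Pre_
    else s) PySem.Set.empty
  initial_modules.foldl (fun deleted mod =>
    if (pvAncestors mod).any (fun anc => PySem.Set.contains sources anc) then
      PySem.Set.add deleted mod
    else deleted) PySem.Set.empty

-- ===== PRECONDITION & SPEC =====
-- Pre_ excludes exactly the inputs on which A raises KeyError: a delete action without a "source" key.
def Pre_get_deleted_modules_from_actions (actions : List (List (String × String))) (initial_modules : List String) (detected_packages : List String) : Prop :=
  ∀ action ∈ actions, PySem.Dict.getD (PySem.Dict.mk action) "action" "move" == "delete" →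
    PySem.Dict.contains (PySem.Dict.mk action) "source" = true

instance (actions : List (List (String × String))) (initial_modules : List String) (detected_packages : List String) : Decidable (Pre_get_deleted_modules_from_actions actions initial_modules detected_packages) := by unfold Pre_get_deleted_modules_from_actions; infer_instance

def pvWitness_get_deleted_modules_from_actions : (List (List (String × String))) × List String × List String :=
  ([[("action", "delete"), ("source", "pkg.a")]], ["pkg.a", "pkg.a.b", "pkg.ab", "other"], ["pkg"])

def Spec_get_deleted_modules_from_actions (actions : List (List (String × String))) (initial_modules : List String) (detected_packages : List String) (out : List String) : Prop := out = get_deleted_modules_from_actions_alt actions initial_modules detected_packages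
instance (actions : List (List (String × String))) (initial_modules : List String) (detected_packages : List String) (out : List String) : Decidable (Spec_get_deleted_modules_from_actions actions initial_modules detected_packages out) := by unfold Spec_get_deleted_modules_from_actions; infer_instance

-- ===== CLAIM (what is proved, stated in full; the proofs are below) =====
def Claim_equal_get_deleted_modules_from_actions : Prop := ∀ (actions : List (List (String × String))) (initial_modules : List String) (detected_packages : List String), Dom_get_deleted_modules_from_actions actions initial_modules detected_packages → Pre_get_deleted_modules_from_actions actions initial_modules detected_packages → Spec_get_deleted_modules_from_actions actions initial_modules detected_packages (get_deleted_modules_from_actions actions initial_modules detected_packages)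

-- ===== LEMMAS AND PROOFS =====

-- a delete source s matches module m in A  ⟺  s is a dotted-prefix ancestor of m in B
theorem pvMatch_iff_mem_ancestors (s m : String) :
    pvMatch s m = true ↔ s ∈ pvAncestors m := by
  unfold pvMatch pvAncestors
  simp only [Bool.or_eq_true, beq_iff_eq, PySem.Str.startswith_eq, PySem.Chars.startswith_iff,
    List.mem_cons, List.mem_filterMap, PySem.List.mem_enumerate_iff]
  constructor
  · rintro (h | h)
    · exact Or.inl h.symm
    · right
      have hl : (s ++ ".").toList = s.toList ++ ['.'] := by simp
      rw [hl] at h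
      obtain ⟨t, ht⟩ := h
      have hlen : s.length < m.toList.length := by
        rw [← ht]; simp
      have hget : m.toList[s.length] = '.' := by
        rw [List.getElem_eq_iff hlen, ← ht, List.append_assoc,
          List.getElem?_append_right (by simp)]
        simp
      refine ⟨((s.length : Int), '.'), ⟨⟨s.length, hlen, by simp [hget]⟩, ?_⟩⟩
      have htake : m.toList.take s.length = s.toList := by
        rw [← ht, List.append_assoc, List.take_left' (by simp)]
      simp [htake]
  · rintro (h | ⟨a, ⟨k, hk, rfl⟩, hsome⟩)
    · exact Or.inl h.symm
    · right
      simp only [Nat.zero_add] at hsome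
      split_ifs at hsome with hc
      · have hs : s = String.ofList (m.toList.take ((0 + (k : Int)).toNat)) :=
          (Option.some_injective _ hsome).symm
        have hsl : s.toList = m.toList.take k := by
          rw [hs]; simp
        have hl : (s ++ ".").toList = m.toList.take (k + 1) := by
          have hg : m.toList[k]?.toList = ['.'] := by
            simp [List.getElem?_eq_getElem hk, hc]
          simp only [String.toList_append]
          rw [hsl, List.take_add_one, hg]
          rfl
        rw [hl]
        exact List.take_prefix _ _

-- membership in a 'for m in l: if p m: t.add(m)' accumulation
theorem pv_mem_foldl_add_if (p : String → Bool) (l acc : List String) (y : String) :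
    y ∈ l.foldl (fun t m => if p m then PySem.Set.add t m else t) acc ↔ y ∈ acc ∨ (y ∈ l ∧ p y = true) := by
  induction l generalizing acc with
  | nil => simp
  | cons x xs ih =>
    by_cases hp : p x = true
    · simp [List.foldl_cons, hp, ih, PySem.Set.mem_add]
      constructor
      · rintro ((h|rfl)|h)
        · exact Or.inl h
        · exact Or.inr ⟨Or.inl rfl, hp⟩
        · exact Or.inr ⟨Or.inr h.1, h.2⟩
      · rintro (h|⟨(rfl|h),hq⟩)
        · exact Or.inl (Or.inl h)
        · exact Or.inl (Or.inr rfl)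
        · exact Or.inr ⟨h, hq⟩
    · simp [List.foldl_cons, hp, ih]
      constructor
      · rintro (h | ⟨h, hq⟩)
        · exact Or.inl h
        · exact Or.inr ⟨Or.inr h, hq⟩
      · rintro (h | ⟨rfl | h, hq⟩)
        · exact Or.inl h
        · exact absurd hq hp
        · exact Or.inr ⟨h, hq⟩

-- 'deleted = set(); for m in xs: if p m: deleted.add(m)'  =  set(xs) filtered by p
theorem pv_foldl_add_if_eq_filter (p : String → Bool) (xs : List String) :
    xs.foldl (fun d m => if p m then PySem.Set.add d m else d) PySem.Set.empty
      = (PySem.Set.ofList xs).filter p := by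
  induction xs using List.reverseRecOn with
  | nil => rfl
  | append_singleton xs x ih =>
    rw [List.foldl_append, List.foldl_cons, List.foldl_nil, ih,
      PySem.Set.ofList_append_singleton, PySem.Set.add_eq_ite]
    by_cases hp : p x = true
    · rw [if_pos hp, PySem.Set.add_eq_ite]
      by_cases hx : x ∈ PySem.Set.ofList xs
      · rw [if_pos (by simp [List.mem_filter, hx, hp]), if_pos hx]
      · rw [if_neg (by simp [List.mem_filter, hx]), if_neg hx, List.filter_append]
        simp [hp]
    · rw [if_neg hp, PySem.Set.add_eq_ite]
      by_cases hx : x ∈ PySem.Set.ofList xs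
      · rw [if_pos hx]
      · rw [if_neg hx, List.filter_append]
        simp [hp]

-- the delete sources, in action order
def pvDelSrcs (actions : List (List (String × String))) : List String :=
  actions.filterMap (fun action =>
    if PySem.Dict.getD (PySem.Dict.mk action) "action" "move" == "delete" then
      PySem.Dict.get? (PySem.Dict.mk action) "source"
    else none)

-- one delete step of A removes exactly the modules matching its source
theorem pv_stepA (cur : List String) (src : String) :
    PySem.Set.diff cur
        (cur.foldl (fun t m => if pvMatch src m then PySem.Set.add t m else t) PySem.Set.empty)
      = cur.filter (fun m => !pvMatch src m) := by
  have hmem : ∀ x : String,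
      x ∈ cur.foldl (fun t m => if pvMatch src m then PySem.Set.add t m else t) PySem.Set.empty
        ↔ (x ∈ cur ∧ pvMatch src x = true) := by
    intro x
    simpa [PySem.Set.empty] using pv_mem_foldl_add_if (pvMatch src) cur PySem.Set.empty x
  show cur.filter _ = _
  apply List.filter_congr
  intro x hx
  have : PySem.Set.contains
      (cur.foldl (fun t m => if pvMatch src m then PySem.Set.add t m else t) PySem.Set.empty) x
      = pvMatch src x := by
    rw [Bool.eq_iff_iff, PySem.Set.contains_iff, hmem]
    simp [hx]
  rw [this]

-- A's whole action loop filters out exactly the modules matched by some delete source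
theorem pv_foldA (actions : List (List (String × String))) (cur : List String) :
    actions.foldl (fun cur action =>
      if PySem.Dict.getD (PySem.Dict.mk action) "action" "move" == "delete" then
        match PySem.Dict.get? (PySem.Dict.mk action) "source" with
        | some source =>
          PySem.Set.diff cur
            (cur.foldl (fun t m => if pvMatch source m then PySem.Set.add t m else t) PySem.Set.empty)
        | none => cur
      else cur) cur
    = cur.filter (fun m => !(pvDelSrcs actions).any (fun s => pvMatch s m)) := by
  induction actions generalizing cur with
  | nil => simp [pvDelSrcs]
  | cons action acts ih =>
    rw [List.foldl_cons]
    by_cases hd : (PySem.Dict.getD (PySem.Dict.mk action) "action" "move" == "delete") = true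
    · rw [if_pos hd]
      cases hs : PySem.Dict.get? (PySem.Dict.mk action) "source" with
      | none =>
        dsimp only
        rw [ih]
        have : pvDelSrcs (action :: acts) = pvDelSrcs acts := by
          simp [pvDelSrcs, eq_of_beq hd, hs]
        rw [this]
      | some src =>
        dsimp only
        rw [ih, pv_stepA, List.filter_filter]
        have : pvDelSrcs (action :: acts) = src :: pvDelSrcs acts := by
          simp [pvDelSrcs, eq_of_beq hd, hs]
        rw [this]
        apply List.filter_congr
        intro x _
        simp [Bool.and_comm]
    · rw [if_neg hd, ih]
      have hd' : ¬ (PySem.Dict.getD (PySem.Dict.mk action) "action" "move" = "delete") := by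
        simpa using hd
      have : pvDelSrcs (action :: acts) = pvDelSrcs acts := by
        simp [pvDelSrcs, hd']
      rw [this]

-- B's source loop accumulates exactly the delete sources
theorem pv_foldS (actions : List (List (String × String))) (acc : List String) :
    actions.foldl (fun s action =>
      if PySem.Dict.getD (PySem.Dict.mk action) "action" "move" == "delete" then
        match PySem.Dict.get? (PySem.Dict.mk action) "source" with
        | some src => PySem.Set.add s src
        | none => s
      else s) acc
    = (pvDelSrcs actions).foldl PySem.Set.add acc := by
  induction actions generalizing acc with
  | nil => rfl
  | cons action acts ih =>
    rw [List.foldl_cons]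
    by_cases hd : (PySem.Dict.getD (PySem.Dict.mk action) "action" "move" == "delete") = true
    · rw [if_pos hd]
      cases hs : PySem.Dict.get? (PySem.Dict.mk action) "source" with
      | none =>
        dsimp only
        rw [ih]
        have : pvDelSrcs (action :: acts) = pvDelSrcs acts := by
          simp [pvDelSrcs, eq_of_beq hd, hs]
        rw [this]
      | some src =>
        dsimp only
        rw [ih]
        have : pvDelSrcs (action :: acts) = src :: pvDelSrcs acts := by
          simp [pvDelSrcs, eq_of_beq hd, hs]
        rw [this, List.foldl_cons]
    · rw [if_neg hd, ih]
      have hd' : ¬ (PySem.Dict.getD (PySem.Dict.mk action) "action" "move" = "delete") := by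
        simpa using hd
      have : pvDelSrcs (action :: acts) = pvDelSrcs acts := by
        simp [pvDelSrcs, hd']
      rw [this]

theorem pv_foldS' (actions : List (List (String × String))) :
    actions.foldl (fun s action =>
      if PySem.Dict.getD (PySem.Dict.mk action) "action" "move" == "delete" then
        match PySem.Dict.get? (PySem.Dict.mk action) "source" with
        | some src => PySem.Set.add s src
        | none => s
      else s) PySem.Set.empty
    = PySem.Set.ofList (pvDelSrcs actions) := by
  rw [pv_foldS]
  exact (PySem.Set.ofList_eq_foldl _).symm

theorem portA_eq_filter (actions : List (List (String × String))) (initial_modules detected_packages : List String) :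
    get_deleted_modules_from_actions actions initial_modules detected_packages
      = (PySem.Set.ofList initial_modules).filter
          (fun m => (pvDelSrcs actions).any (fun s => pvMatch s m)) := by
  unfold get_deleted_modules_from_actions
  rw [pv_foldA]
  show (PySem.Set.ofList initial_modules).filter _ = _
  apply List.filter_congr
  intro m hm
  set C := (PySem.Set.ofList initial_modules).filter
      (fun m => !(pvDelSrcs actions).any (fun s => pvMatch s m)) with hC
  cases ha : (pvDelSrcs actions).any (fun s => pvMatch s m)
  · have : PySem.Set.contains C m = true := by
      rw [PySem.Set.contains_iff, hC]
      simp [List.mem_filter, hm, ha]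
    simp [this]
    simp [hC, List.mem_filter, hm, ha]
  · have : PySem.Set.contains C m = false := by
      rw [← Bool.not_eq_true]
      simp only [PySem.Set.contains_iff, hC]
      simp [List.mem_filter, ha]
    simp [this]
    simp [hC, List.mem_filter, ha]

theorem portB_eq_filter (actions : List (List (String × String))) (initial_modules detected_packages : List String) :
    get_deleted_modules_from_actions_alt actions initial_modules detected_packages
      = (PySem.Set.ofList initial_modules).filter
          (fun m => (pvAncestors m).any
            (fun a => PySem.Set.contains (PySem.Set.ofList (pvDelSrcs actions)) a)) := by
  unfold get_deleted_modules_from_actions_alt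
  rw [pv_foldS']
  exact pv_foldl_add_if_eq_filter _ initial_modules

-- ===== VERDICT (by name: the statement is the Claim_ definition above) =====
theorem get_deleted_modules_from_actions_spec : Claim_equal_get_deleted_modules_from_actions := by
  intro actions initial_modules detected_packages _ _
  unfold Spec_get_deleted_modules_from_actions
  rw [portA_eq_filter, portB_eq_filter]
  apply List.filter_congr
  intro m _
  rw [Bool.eq_iff_iff]
  simp only [List.any_eq_true]
  constructor
  · rintro ⟨s, hs, hmt⟩
    exact ⟨s, (pvMatch_iff_mem_ancestors s m).1 hmt, by
      rw [PySem.Set.contains_iff, PySem.Set.mem_ofList]; exact hs⟩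
  · rintro ⟨a, ha, hc⟩
    exact ⟨a, by rwa [PySem.Set.contains_iff, PySem.Set.mem_ofList] at hc,
      (pvMatch_iff_mem_ancestors a m).2 ha⟩
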